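-- pv_equiv track=rewrite | github.com/DireLines/MusicOfTheSpheres | PythonDrafts/midiParsing.py | getTimeSpentPlayingNote
-- ===== SOURCE A (Python) =====
-- def getEventsForNote(eventList,note):
-- 	result = []
-- 	for event in eventList:
-- 		if event[0] == note:
-- 			result.append(event)
-- 	result.sort(key = lambda x: int(x[1]))
-- 	return result
--
-- def getTimeSpentPlayingNote(eventList,note):
-- 	result = 0
-- 	eventsForNote = getEventsForNote(eventList,note)
-- 	numEvents = len(eventsForNote)
-- 	i = 1
-- 	while(i < numEvents):
-- 		result += eventsForNote[i][1] - eventsForNote[i-1][1]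
-- 		i += 2
-- 	return result
-- ===== SOURCE B (Python) =====
-- def getTimeSpentPlayingNote(eventList, note):
--     times = [e[1] for e in eventList if e[0] == note]
--     total = 0
--     while len(times) >= 2:
--         a = min(times)
--         times.remove(a)
--         b = min(times)
--         times.remove(b)
--         total += b - a
--     return total
-- ===== Notes on version B (the rewrite author's own statement) =====
-- stated objective: alternative
-- what changed: B never sorts: it extracts the matching timestamps and repeatedly pulls the two smallest remaining with min()/remove(), accumulating their difference, instead of A's filter + stable sort + stride-2 index loop over the sorted event records.
import Mathlib
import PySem

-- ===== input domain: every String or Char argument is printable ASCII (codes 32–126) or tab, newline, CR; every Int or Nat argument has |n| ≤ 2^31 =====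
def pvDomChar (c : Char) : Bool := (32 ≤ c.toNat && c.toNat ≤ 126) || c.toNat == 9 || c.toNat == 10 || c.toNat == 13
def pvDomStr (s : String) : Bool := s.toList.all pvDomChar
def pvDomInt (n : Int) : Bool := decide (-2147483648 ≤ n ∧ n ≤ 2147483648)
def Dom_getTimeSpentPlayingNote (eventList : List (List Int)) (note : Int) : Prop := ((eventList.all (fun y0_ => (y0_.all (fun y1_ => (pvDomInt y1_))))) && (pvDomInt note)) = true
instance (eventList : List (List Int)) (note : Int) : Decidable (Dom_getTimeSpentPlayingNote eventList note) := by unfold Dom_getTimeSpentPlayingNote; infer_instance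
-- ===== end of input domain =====

-- B replaces A's filter + stable sort + stride-2 index loop by a sort-free selection loop:
-- it extracts the matching timestamps and repeatedly removes the two smallest with min()/remove(),
-- accumulating their difference; alternative decomposition (A is O(n log n), B is O(n^2)).


-- ===== PORT A =====
-- event[0] / event[1]: indices 0 and 1 are in range under Pre_ (events nonempty, matching events
-- of length ≥ 2), where List.getD is exact for Python's e[0] / e[1].
def pvFst (e : List Int) : Int := e.getD 0 0
def pvSnd (e : List Int) : Int := e.getD 1 0

-- getEventsForNote: append loop, then result.sort(key=lambda x: int(x[1])) (int() of an int is itself)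
def getEventsForNote (eventList : List (List Int)) (note : Int) : List (List Int) :=
  let result := eventList.foldl (fun acc event => if pvFst event == note then acc ++ [event] else acc) []
  PySem.List.sorted result (fun x => pvSnd x) false

-- the while loop: i starts at 1, i += 2; loop counter i is a nonnegative index < length inside the
-- guard, where List.getD is exact for eventsForNote[i] / eventsForNote[i-1]
def pvLoopA (ev : List (List Int)) (i : Nat) (acc : Int) : Int :=
  if _h : i < ev.length then
    pvLoopA ev (i + 2) (acc + (pvSnd (ev.getD i []) - pvSnd (ev.getD (i - 1) [])))
  else acc
termination_by ev.length - i

def getTimeSpentPlayingNote (eventList : List (List Int)) (note : Int) : Int :=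
  let eventsForNote := getEventsForNote eventList note
  pvLoopA eventsForNote 1 0

-- ===== PORT B =====
-- the while loop: under its guard (len ≥ 2) both min() calls see a nonempty list (min? is some)
-- and both remove() calls remove a present element (remove? is some), so the .getD defaults are
-- never read; PySem.List.min?/remove? are exact for Python's min(list)/list.remove(v).
def pvLoopB (times : List Int) (total : Int) : Int :=
  if _h : 2 ≤ times.length then
    let a := (PySem.List.min? times (fun x => x)).getD 0
    let t1 := (PySem.List.remove? times a).getD []
    let b := (PySem.List.min? t1 (fun x => x)).getD 0
    let t2 := (PySem.List.remove? t1 b).getD []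
    pvLoopB t2 (total + (b - a))
  else total
termination_by times.length
decreasing_by
  have h1 : t1.length < times.length := by
    cases hr : PySem.List.remove? times a with
    | none => simp [t1, hr]; omega
    | some r =>
      have hm : a ∈ times := by
        by_contra hna
        rw [(PySem.List.remove?_eq_none_iff times a).2 hna] at hr; cases hr
      rw [PySem.List.remove?_eq_some_erase times a hm] at hr
      cases hr
      simp [t1, PySem.List.remove?_eq_some_erase times a hm, List.length_erase_of_mem hm]
      omega
  have h2 : t2.length ≤ t1.length := by
    cases hr : PySem.List.remove? t1 b with
    | none => simp [t2, hr]
    | some r =>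
      have hm : b ∈ t1 := by
        by_contra hnb
        rw [(PySem.List.remove?_eq_none_iff t1 b).2 hnb] at hr; cases hr
      rw [PySem.List.remove?_eq_some_erase t1 b hm] at hr
      cases hr
      simp [t2, PySem.List.remove?_eq_some_erase t1 b hm, List.length_erase_of_mem hm]
  exact lt_of_le_of_lt h2 h1

-- B: times = [e[1] for e in eventList if e[0] == note], then the selection loop
def getTimeSpentPlayingNote_alt (eventList : List (List Int)) (note : Int) : Int :=
  let times := (eventList.filter (fun e => pvFst e == note)).map pvSnd
  pvLoopB times 0

-- ===== PRECONDITION & SPEC =====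
-- Pre_: exactly where Python A returns normally — every event nonempty (event[0] is read for every
-- event) and every event matching the note has a second element (its int(x[1]) sort key and the
-- loop's [1] accesses).
def Pre_getTimeSpentPlayingNote (eventList : List (List Int)) (note : Int) : Prop :=
  ∀ e ∈ eventList, e ≠ [] ∧ (pvFst e = note → 2 ≤ e.length)
instance (eventList : List (List Int)) (note : Int) : Decidable (Pre_getTimeSpentPlayingNote eventList note) := by unfold Pre_getTimeSpentPlayingNote; infer_instance

def pvWitness_getTimeSpentPlayingNote : List (List Int) × Int := ([[5, 0], [5, 10], [5, 12], [5, 30]], 5)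

def Spec_getTimeSpentPlayingNote (eventList : List (List Int)) (note : Int) (out : Int) : Prop := out = getTimeSpentPlayingNote_alt eventList note
instance (eventList : List (List Int)) (note : Int) (out : Int) : Decidable (Spec_getTimeSpentPlayingNote eventList note out) := by unfold Spec_getTimeSpentPlayingNote; infer_instance

-- ===== CLAIM (what is proved, stated in full; the proofs are below) =====
def Claim_equal_getTimeSpentPlayingNote : Prop := ∀ (eventList : List (List Int)) (note : Int), Dom_getTimeSpentPlayingNote eventList note → Pre_getTimeSpentPlayingNote eventList note → Spec_getTimeSpentPlayingNote eventList note (getTimeSpentPlayingNote eventList note)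

-- ===== LEMMAS AND PROOFS =====

-- alternating sum of consecutive pair differences, on the event records and on plain ints
def pvPairDiff : List (List Int) → Int
  | a :: b :: r => (pvSnd b - pvSnd a) + pvPairDiff r
  | _ => 0

def pvAlt : List Int → Int
  | a :: b :: r => (b - a) + pvAlt r
  | _ => 0

-- the while loop from index i+2 on a list extended by two elements in front is the loop from i
lemma pvLoopA_shift (n : Nat) : ∀ (a b : List Int) (r : List (List Int)) (i : Nat) (acc : Int),
    r.length - i ≤ n → 1 ≤ i → pvLoopA (a :: b :: r) (i + 2) acc = pvLoopA r i acc := by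
  induction n with
  | zero =>
    intro a b r i acc hle hi
    unfold pvLoopA
    rw [dif_neg (by simp only [List.length_cons]; omega), dif_neg (by omega)]
  | succ n ih =>
    intro a b r i acc hle hi
    unfold pvLoopA
    by_cases h : i < r.length
    · rw [dif_pos (by simp only [List.length_cons]; omega), dif_pos h]
      have e1 : (a :: b :: r).getD (i + 2) ([] : List Int) = r.getD i [] := rfl
      have e2 : (a :: b :: r).getD (i + 2 - 1) ([] : List Int) = r.getD (i - 1) [] := by
        have e : i + 2 - 1 = ((i - 1) + 1) + 1 := by omega
        rw [e, List.getD_cons_succ, List.getD_cons_succ]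
      rw [e1, e2, ih a b r (i + 2) _ (by omega) (by omega)]
    · rw [dif_neg (by simp only [List.length_cons]; omega), dif_neg h]

-- A's while loop computes the paired differences
lemma pvLoopA_eq (ev : List (List Int)) : ∀ acc : Int, pvLoopA ev 1 acc = acc + pvPairDiff ev := by
  induction ev using pvPairDiff.induct with
  | case1 a b r ih =>
    intro acc
    unfold pvLoopA
    rw [dif_pos (by simp only [List.length_cons]; omega)]
    rw [pvLoopA_shift r.length a b r 1 _ (by omega) (by omega), ih]
    have g1 : (a :: b :: r).getD 1 ([] : List Int) = b := rfl
    have g0 : (a :: b :: r).getD (1 - 1) ([] : List Int) = a := rfl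
    rw [g1, g0]
    simp only [pvPairDiff]
    ring
  | case2 t hne =>
    intro acc
    have hpd : pvPairDiff t = 0 := by
      match t with
      | [] => rfl
      | [a] => rfl
      | a :: b :: r => exact (hne a b r rfl).elim
    have hlen : t.length ≤ 1 := by
      match t with
      | [] => simp
      | [a] => simp
      | a :: b :: r => exact (hne a b r rfl).elim
    unfold pvLoopA
    rw [dif_neg (by omega), hpd]
    ring

-- paired differences of event records = alternating sum of their second components
lemma pvPairDiff_eq_pvAlt_map (ev : List (List Int)) : pvPairDiff ev = pvAlt (ev.map pvSnd) := by
  induction ev using pvPairDiff.induct with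
  | case1 a b r ih => simp only [pvPairDiff, List.map_cons, pvAlt, ih]
  | case2 t hne =>
    match t with
    | [] => rfl
    | [a] => rfl
    | a :: b :: r => exact (hne a b r rfl).elim

-- the id-sorted order of the second components is the map of the key-sorted events
lemma pvSortedMap (ev : List (List Int)) :
    PySem.List.sorted (ev.map pvSnd) (fun x => x) false
      = (PySem.List.sorted ev (fun x => pvSnd x) false).map pvSnd := by
  apply PySem.List.sorted_id_eq_of_perm_of_pairwise
  · exact (PySem.List.sorted_perm ev (fun x => pvSnd x) false).map pvSnd
  · exact PySem.List.sorted_map_key_pairwise ev (fun x => pvSnd x)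

-- pulling the minimum off the front of an id-sorted list
lemma pvSortedCons (xs : List Int) (m : Int) (hm : m ∈ xs) (hmin : ∀ y ∈ xs, m ≤ y) :
    PySem.List.sorted xs (fun x => x) false
      = m :: PySem.List.sorted (xs.erase m) (fun x => x) false := by
  apply PySem.List.sorted_id_eq_of_perm_of_pairwise
  · exact ((PySem.List.sorted_perm (xs.erase m) (fun x => x) false).cons m).trans
      (List.perm_cons_erase hm).symm
  · refine List.Pairwise.cons ?_ ?_
    · intro y hy
      exact hmin y (List.mem_of_mem_erase ((PySem.List.mem_sorted (xs.erase m) (fun x => x) false y).1 hy))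
    · exact PySem.List.sorted_pairwise (xs.erase m) (fun x => x)

-- B's selection loop computes the alternating sum of the id-sorted list
lemma pvLoopB_eq (n : Nat) : ∀ (times : List Int) (total : Int), times.length ≤ n →
    pvLoopB times total = total + pvAlt (PySem.List.sorted times (fun x => x) false) := by
  induction n with
  | zero =>
    intro times total hn
    have he : times = [] := List.length_eq_zero_iff.1 (by omega)
    subst he
    rw [pvLoopB.eq_def]
    rw [dif_neg (by simp)]
    simp [PySem.List.sorted, pvAlt]
  | succ n ih =>
    intro times total hn
    rw [pvLoopB.eq_def]
    by_cases h : 2 ≤ times.length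
    · rw [dif_pos h]
      obtain ⟨a, ha⟩ : ∃ a, PySem.List.min? times (fun x => x) = some a := by
        cases hmo : PySem.List.min? times (fun x => x) with
        | none =>
          exfalso
          have := (PySem.List.min?_eq_none_iff times (fun x => x)).1 hmo
          subst this; simp at h
        | some a => exact ⟨a, rfl⟩
      have haMem : a ∈ times := PySem.List.min?_mem ha
      have haMin : ∀ y ∈ times, a ≤ y := PySem.List.min?_isMin ha
      have ht1 : PySem.List.remove? times a = some (times.erase a) :=
        PySem.List.remove?_eq_some_erase times a haMem
      have hlen1 : (times.erase a).length = times.length - 1 :=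
        List.length_erase_of_mem haMem
      obtain ⟨b, hb⟩ : ∃ b, PySem.List.min? (times.erase a) (fun x => x) = some b := by
        cases hmo : PySem.List.min? (times.erase a) (fun x => x) with
        | none =>
          exfalso
          have := (PySem.List.min?_eq_none_iff (times.erase a) (fun x => x)).1 hmo
          have : (times.erase a).length = 0 := by rw [this]; rfl
          omega
        | some b => exact ⟨b, rfl⟩
      have hbMem : b ∈ times.erase a := PySem.List.min?_mem hb
      have hbMin : ∀ y ∈ times.erase a, b ≤ y := PySem.List.min?_isMin hb
      have ht2 : PySem.List.remove? (times.erase a) b = some ((times.erase a).erase b) :=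
        PySem.List.remove?_eq_some_erase (times.erase a) b hbMem
      have hlen2 : ((times.erase a).erase b).length = (times.erase a).length - 1 :=
        List.length_erase_of_mem hbMem
      simp only [ha, ht1, Option.getD_some]
      simp only [hb, ht2, Option.getD_some]
      rw [ih ((times.erase a).erase b) _ (by omega)]
      rw [pvSortedCons times a haMem haMin,
          pvSortedCons (times.erase a) b hbMem hbMin]
      simp only [pvAlt]
      ring
    · rw [dif_neg h]
      have hAlt : pvAlt (PySem.List.sorted times (fun x => x) false) = 0 := by
        have hl : (PySem.List.sorted times (fun x => x) false).length ≤ 1 := by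
          rw [PySem.List.length_sorted]; omega
        cases hs : PySem.List.sorted times (fun x => x) false with
        | nil => rfl
        | cons x t =>
          cases t with
          | nil => rfl
          | cons y r => rw [hs] at hl; simp at hl
      rw [hAlt]; ring

-- ===== VERDICT (by name: the statement is the Claim_ definition above) =====

theorem getTimeSpentPlayingNote_spec : Claim_equal_getTimeSpentPlayingNote := by
  intro eventList note _ _
  unfold Spec_getTimeSpentPlayingNote getTimeSpentPlayingNote getTimeSpentPlayingNote_alt getEventsForNote
  rw [PySem.List.foldl_append_if_eq_filter]
  simp only [List.nil_append]
  set evf := eventList.filter (fun e => pvFst e == note) with hevf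
  rw [pvLoopA_eq, zero_add, pvPairDiff_eq_pvAlt_map, ← pvSortedMap,
      pvLoopB_eq (evf.map pvSnd).length _ _ (le_refl _), zero_add]
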